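-- pv_equiv track=rewrite | github.com/vinchinzu/euler | python/864.py | solve_pell_minus1
-- ===== SOURCE A (Python) =====
-- import math
--
-- def solve_pell_minus1(k, max_x):
--     # Solve x^2 - k y^2 = -1
--     # Returns list of (x, y) with x <= max_x
--
--     # Continued fraction for sqrt(k)
--     m = 0
--     d = 1
--     a = int(math.isqrt(k))
--     a0 = a
--     if a * a == k:
--         return [] # Perfect square, no solutions for -1 (0 - k y^2 = -1 impossible)
--
--     # convergents
--     num1, num2 = 1, 0
--     den1, den2 = 0, 1
--
--     # Period checking
--     # We need to find period length L.
--     # If L is even, no solution.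
--     # If L is odd, fundamental solution is convergent (p_{L-1}, q_{L-1})
--
--     # Actually we can just generate convergents and check x^2 - k y^2
--     # The first one to equal -1 is the fundamental solution.
--     # If we encounter +1 first, then no solution for -1 exists.
--
--     history = {}
--     idx = 0
--
--     while True:
--         # Update convergents
--         # p_n = a_n p_{n-1} + p_{n-2}
--         num = a * num1 + num2
--         den = a * den1 + den2
--
--         # Check Pell equation
--         # x = num, y = den
--         val = num*num - k*den*den
--         if val == -1:
--             # Found fundamental solution
--             fund_x, fund_y = num, den
--             break
--         if val == 1 and idx > 0:
--             # Found +1 before -1, so no solution for -1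
--             return []
--
--         num2, num1 = num1, num
--         den2, den1 = den1, den
--
--         # Next term in expansion
--         m = d * a - m
--         d = (k - m * m) // d
--         a = (a0 + m) // d
--
--         state = (m, d, a)
--         if state in history:
--              # Period detected and no -1 found yet (should have been caught by val==1 check usually)
--              return []
--         history[state] = idx
--         idx += 1
--
--     # We have fundamental solution (x1, y1)
--     # Generate all solutions x <= max_x
--     # (x + y sqrt(k)) = (x1 + y1 sqrt(k))^(2m-1)
--     # alpha = x1 + y1 sqrt(k)
--     # alpha^1 is sol
--     # alpha^3, alpha^5...
--     # Multiply by alpha^2 to get next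
--
--     sol_list = []
--
--     cx, cy = fund_x, fund_y
--
--     # Multiplier alpha^2
--     # alpha^2 = (x1 + y1 sqrt(k))^2 = (x1^2 + k y1^2) + 2 x1 y1 sqrt(k)
--     # x1^2 + k y1^2 = x1^2 + (x1^2 + 1) = 2 x1^2 + 1
--
--     mul_x = 2 * fund_x * fund_x + 1
--     mul_y = 2 * fund_x * fund_y
--
--     while cx <= max_x:
--         sol_list.append((cx, cy))
--
--         # Next
--         nx = cx * mul_x + cy * mul_y * k
--         ny = cx * mul_y + cy * mul_x
--         cx, cy = nx, ny
--
--     return sol_list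
-- ===== SOURCE B (Python) =====
-- import math
--
-- def solve_pell_minus1(k, max_x):
--     # Solve x^2 - k y^2 = -1; list solutions with x <= max_x.
--     # Phase 1: collect the partial quotients of sqrt(k) until the CF state repeats.
--     # Phase 2: scan convergents built from that list for the fundamental solution.
--     a0 = int(math.isqrt(k))
--     if a0 * a0 == k:
--         return []  # perfect square: no solution
--     quotients = [a0]
--     m, d, a = 0, 1, a0
--     seen = set()
--     while True:
--         m = d * a - m
--         d = (k - m * m) // d
--         a = (a0 + m) // d
--         if (m, d, a) in seen:
--             break
--         seen.add((m, d, a))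
--         quotients.append(a)
--     fund = None
--     num1, num2 = 1, 0
--     den1, den2 = 0, 1
--     for i, q in enumerate(quotients):
--         num = q * num1 + num2
--         den = q * den1 + den2
--         val = num * num - k * den * den
--         if val == -1:
--             fund = (num, den)
--             break
--         if val == 1 and i > 0:
--             return []
--         num2, num1 = num1, num
--         den2, den1 = den1, den
--     if fund is None:
--         return []
--     fund_x, fund_y = fund
--     mul_x = 2 * fund_x * fund_x + 1
--     mul_y = 2 * fund_x * fund_y
--     sol_list = []
--     cx, cy = fund_x, fund_y
--     while cx <= max_x:
--         sol_list.append((cx, cy))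
--         cx, cy = cx * mul_x + cy * mul_y * k, cx * mul_y + cy * mul_x
--     return sol_list
-- ===== Notes on version B (the rewrite author's own statement) =====
-- stated objective: alternative
-- what changed: A interleaves one while-loop that advances the CF state, maintains convergents, checks the Pell value and detects period via a dict of states; B separates the phases: first a loop over only the (m,d,a) recurrence collecting the partial-quotient list until the state repeats, then a single enumerate pass over that list building convergents and testing x^2-ky^2=-1, with the alpha^2-doubling enumeration kept as in A.
import Mathlib
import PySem

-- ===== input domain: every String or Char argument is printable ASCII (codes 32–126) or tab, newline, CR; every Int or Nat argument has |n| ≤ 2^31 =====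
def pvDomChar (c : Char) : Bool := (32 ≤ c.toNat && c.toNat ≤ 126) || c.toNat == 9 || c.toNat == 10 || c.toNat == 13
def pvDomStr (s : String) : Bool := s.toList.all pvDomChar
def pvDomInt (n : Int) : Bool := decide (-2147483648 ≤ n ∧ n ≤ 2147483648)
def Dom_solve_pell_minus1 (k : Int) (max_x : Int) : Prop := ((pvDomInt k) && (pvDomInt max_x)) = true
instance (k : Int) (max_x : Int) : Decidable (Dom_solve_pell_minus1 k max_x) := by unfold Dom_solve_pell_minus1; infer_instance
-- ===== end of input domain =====

-- B separates A's single interleaved loop into two phases: a CF-state loop that only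
-- collects the partial quotients until the state repeats, then one pass over that list
-- building convergents and testing x^2 - k*y^2 = -1; the solution-doubling loop is unchanged.


-- ===== PORT A =====
-- math.isqrt(k) for k ≥ 0 (k < 0, where Python raises ValueError, is outside Pre_)
def pvIsqrt (k : Int) : Int := (Nat.sqrt k.toNat : Int)

-- A's 'while True' search loop: convergents, Pell-value checks and dict-based period
-- detection interleaved; fuel replaces 'while True' (the loop state is finite).
def pellLoopA (k a0 : Int) : Nat → Int → Int → Int → Int → Int → Int → Int →
    PySem.Dict (Int × Int × Int) Int → Int → Option (Int × Int)
  | 0, _, _, _, _, _, _, _, _, _ => none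
  | fuel+1, m, d, a, num1, num2, den1, den2, history, idx =>
    let num := a * num1 + num2
    let den := a * den1 + den2
    let val := num * num - k * den * den
    if val = -1 then some (num, den)
    else if val = 1 ∧ idx > 0 then none
    else
      let m' := d * a - m
      let d' := PySem.Int.floordiv (k - m' * m') d
      let a' := PySem.Int.floordiv (a0 + m') d'
      if (history.get? (m', d', a')).isSome then none
      else pellLoopA k a0 fuel m' d' a' num num1 den den1
             (history.insert (m', d', a') idx) (idx + 1)

-- A's 'while cx <= max_x' solution loop (appending becomes cons)
def pellGenA (k max_x mul_x mul_y : Int) : Nat → Int → Int → List (Int × Int)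
  | 0, _, _ => []
  | fuel+1, cx, cy =>
    if cx ≤ max_x then
      (cx, cy) :: pellGenA k max_x mul_x mul_y fuel (cx * mul_x + cy * mul_y * k) (cx * mul_y + cy * mul_x)
    else []

def solve_pell_minus1 (k : Int) (max_x : Int) : List (Int × Int) :=
  let a0 := pvIsqrt k
  if a0 * a0 = k then []
  else
    match pellLoopA k a0 (2 ^ 40 + 1) 0 1 a0 1 0 0 1 PySem.Dict.empty 0 with
    | none => []
    | some (fund_x, fund_y) =>
      pellGenA k max_x (2 * fund_x * fund_x + 1) (2 * fund_x * fund_y) 256 fund_x fund_y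

-- ===== PORT B =====
-- Phase 1: advance only the CF recurrence, collecting partial quotients until the state repeats
def cfQuotsB (k a0 : Int) : Nat → Int → Int → Int → PySem.Set (Int × Int × Int) → List Int
  | 0, _, _, _, _ => []
  | fuel+1, m, d, a, seen =>
    let m' := d * a - m
    let d' := PySem.Int.floordiv (k - m' * m') d
    let a' := PySem.Int.floordiv (a0 + m') d'
    if (m', d', a') ∈ seen then []
    else a' :: cfQuotsB k a0 fuel m' d' a' (PySem.Set.add seen (m', d', a'))

-- Phase 2: one enumerate pass over the quotient list, building convergents
def convScanB (k : Int) : List Int → Int → Int → Int → Int → Int → Option (Int × Int)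
  | [], _, _, _, _, _ => none
  | q :: rest, num1, num2, den1, den2, i =>
    let num := q * num1 + num2
    let den := q * den1 + den2
    let val := num * num - k * den * den
    if val = -1 then some (num, den)
    else if val = 1 ∧ i > 0 then none
    else convScanB k rest num num1 den den1 (i + 1)

-- B's 'while cx <= max_x' solution loop (same as A's)
def pellGenB (k max_x mul_x mul_y : Int) : Nat → Int → Int → List (Int × Int)
  | 0, _, _ => []
  | fuel+1, cx, cy =>
    if cx ≤ max_x then
      (cx, cy) :: pellGenB k max_x mul_x mul_y fuel (cx * mul_x + cy * mul_y * k) (cx * mul_y + cy * mul_x)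
    else []

def solve_pell_minus1_alt (k : Int) (max_x : Int) : List (Int × Int) :=
  let a0 := pvIsqrt k
  if a0 * a0 = k then []
  else
    let quotients := a0 :: cfQuotsB k a0 (2 ^ 40) 0 1 a0 PySem.Set.empty
    match convScanB k quotients 1 0 0 1 0 with
    | none => []
    | some (fund_x, fund_y) =>
      pellGenB k max_x (2 * fund_x * fund_x + 1) (2 * fund_x * fund_y) 256 fund_x fund_y

-- ===== PRECONDITION & SPEC =====
-- Pre_ excludes k < 0, on which Python's math.isqrt raises ValueError.
def Pre_solve_pell_minus1 (k : Int) (max_x : Int) : Prop := 0 ≤ k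
instance (k : Int) (max_x : Int) : Decidable (Pre_solve_pell_minus1 k max_x) := by unfold Pre_solve_pell_minus1; infer_instance
def pvWitness_solve_pell_minus1 : Int × Int := (2, 50)

def Spec_solve_pell_minus1 (k : Int) (max_x : Int) (out : List (Int × Int)) : Prop := out = solve_pell_minus1_alt k max_x
instance (k : Int) (max_x : Int) (out : List (Int × Int)) : Decidable (Spec_solve_pell_minus1 k max_x out) := by unfold Spec_solve_pell_minus1; infer_instance

-- ===== CLAIM (what is proved, stated in full; the proofs are below) =====
def Claim_equal_solve_pell_minus1 : Prop := ∀ (k : Int) (max_x : Int), Dom_solve_pell_minus1 k max_x → Pre_solve_pell_minus1 k max_x → Spec_solve_pell_minus1 k max_x (solve_pell_minus1 k max_x)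

-- ===== LEMMAS AND PROOFS =====

-- the two solution-doubling loops are the same function
lemma gen_eq (k max_x mul_x mul_y : Int) :
    ∀ (f : Nat) (cx cy : Int), pellGenA k max_x mul_x mul_y f cx cy = pellGenB k max_x mul_x mul_y f cx cy := by
  intro f
  induction f with
  | zero => intro cx cy; rfl
  | succ n ih =>
    intro cx cy
    simp only [pellGenA, pellGenB, ih]

-- A's interleaved loop equals B's two phases, in lockstep: the history dict's keys and
-- the seen set hold the same states, and A's idx is B's enumerate index.
lemma loop_eq (k a0 : Int) :
    ∀ (f : Nat) (m d a num1 num2 den1 den2 : Int)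
      (hist : PySem.Dict (Int × Int × Int) Int) (seen : PySem.Set (Int × Int × Int)) (idx : Int),
      (∀ st, (hist.get? st).isSome = true ↔ st ∈ seen) →
      pellLoopA k a0 (f + 1) m d a num1 num2 den1 den2 hist idx =
        convScanB k (a :: cfQuotsB k a0 f m d a seen) num1 num2 den1 den2 idx := by
  intro f
  induction f with
  | zero =>
    intro m d a num1 num2 den1 den2 hist seen idx hinv
    simp only [pellLoopA, convScanB, cfQuotsB]
    split_ifs <;> rfl
  | succ n ih =>
    intro m d a num1 num2 den1 den2 hist seen idx hinv
    simp only [pellLoopA, convScanB]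
    by_cases h1 : (a * num1 + num2) * (a * num1 + num2) - k * (a * den1 + den2) * (a * den1 + den2) = -1
    · rw [if_pos h1, if_pos h1]
    · rw [if_neg h1, if_neg h1]
      by_cases h2 : (a * num1 + num2) * (a * num1 + num2) - k * (a * den1 + den2) * (a * den1 + den2) = 1 ∧ idx > 0
      · rw [if_pos h2, if_pos h2]
      · rw [if_neg h2, if_neg h2]
        simp only [cfQuotsB]
        generalize d * a - m = M
        generalize PySem.Int.floordiv (k - M * M) d = D
        generalize PySem.Int.floordiv (a0 + M) D = A
        by_cases hmem : (M, D, A) ∈ seen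
        · rw [if_pos hmem, if_pos ((hinv _).mpr hmem)]
          rfl
        · rw [if_neg hmem, if_neg (fun h => hmem ((hinv _).mp h))]
          exact ih M D A _ _ _ _ (hist.insert (M, D, A) idx) (PySem.Set.add seen (M, D, A)) (idx + 1)
            (fun st => by
              by_cases hst : st = (M, D, A)
              · subst hst; simp [PySem.Dict.get?_insert_self, PySem.Set.mem_add]
              · rw [PySem.Dict.get?_insert_of_ne hist idx hst]
                simp [PySem.Set.mem_add, hst, hinv st])

theorem solve_pell_minus1_spec : Claim_equal_solve_pell_minus1 := by
  intro k max_x _ _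
  unfold Spec_solve_pell_minus1 solve_pell_minus1 solve_pell_minus1_alt
  by_cases hsq : pvIsqrt k * pvIsqrt k = k
  · simp [hsq]
  · simp only [hsq, if_false]
    rw [loop_eq k (pvIsqrt k) (2 ^ 40) 0 1 (pvIsqrt k) 1 0 0 1 PySem.Dict.empty PySem.Set.empty 0
      (fun st => by simp [PySem.Dict.get?_empty, PySem.Set.empty])]
    cases convScanB k (pvIsqrt k :: cfQuotsB k (pvIsqrt k) (2 ^ 40) 0 1 (pvIsqrt k) PySem.Set.empty) 1 0 0 1 0 with
    | none => rfl
    | some p => cases p with | mk fx fy => simp [gen_eq]
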